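-- pv_equiv track=rewrite | github.com/josh-spratt/advent-of-code | 2025/day06/solution.py | find_problem_column_groups
-- ===== SOURCE A (Python) =====
-- def find_problem_column_groups(grid, width, height):
--     """
--     Scans the grid to identify groups of columns that form a single math problem.
--     Problems are separated by one or more fully blank columns.
--     """
--     if width == 0:
--         return []
--
--     problem_groups = []
--     current_group = []
--
--     for col_idx in range(width):
--         is_blank = all(grid[row][col_idx] == " " for row in range(height))
--         if is_blank:
--             if current_group:
--                 problem_groups.append(current_group)
--                 current_group = []
--         else:
--             current_group.append(col_idx)
--
--     if current_group:
--         problem_groups.append(current_group)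
--
--     return problem_groups
-- ===== SOURCE B (Python) =====
-- def find_problem_column_groups(grid, width, height):
--     """Boundary detection: a column STARTS a group iff it is non-blank and
--     (it is column 0 or its left neighbour is blank); it ENDS a group iff it
--     is non-blank and (it is the last column or its right neighbour is blank).
--     Zip the start columns with the end columns and emit each closed range.
--     No sequential run/flush state is maintained."""
--     def blank(c):
--         return all(grid[row][c] == " " for row in range(height))
--     starts = [c for c in range(width) if not blank(c) and (c == 0 or blank(c - 1))]
--     ends = [c for c in range(width) if not blank(c) and (c == width - 1 or blank(c + 1))]
--     return [list(range(s, e + 1)) for s, e in zip(starts, ends)]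
-- ===== Notes on version B (the rewrite author's own statement) =====
-- stated objective: alternative
-- what changed: A accumulates a current run and flushes it on blank columns; B keeps no run state at all: it detects group boundaries locally (a column is a start iff non-blank with blank/edge on its left, an end iff non-blank with blank/edge on its right), zips the start list with the end list, and emits each group as range(s, e+1).
import Mathlib
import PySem

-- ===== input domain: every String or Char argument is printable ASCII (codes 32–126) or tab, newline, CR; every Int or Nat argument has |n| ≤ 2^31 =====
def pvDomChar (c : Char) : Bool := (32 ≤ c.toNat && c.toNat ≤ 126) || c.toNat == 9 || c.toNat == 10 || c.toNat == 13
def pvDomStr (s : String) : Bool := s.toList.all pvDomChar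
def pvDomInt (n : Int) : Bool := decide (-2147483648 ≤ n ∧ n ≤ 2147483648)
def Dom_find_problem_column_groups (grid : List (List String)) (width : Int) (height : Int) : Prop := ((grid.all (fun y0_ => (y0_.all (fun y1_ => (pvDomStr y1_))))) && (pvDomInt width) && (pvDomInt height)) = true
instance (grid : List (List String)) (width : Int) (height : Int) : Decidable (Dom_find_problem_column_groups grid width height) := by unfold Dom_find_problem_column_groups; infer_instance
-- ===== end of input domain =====

-- B replaces A's accumulate-and-flush run loop with stateless boundary detection:
-- it filters the start columns and the end columns of groups independently, zips
-- them, and emits each group as a range (objective: alternative; same asymptotic cost).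


-- ===== PORT A =====
-- grid[row][col] (none exactly where Python raises IndexError; Pre_ excludes such runs)
def pvCell (grid : List (List String)) (row col : Int) : Option String :=
  (PySem.List.pyGet? grid row).bind (fun r => PySem.List.pyGet? r col)

-- is_blank = all(grid[row][col_idx] == " " for row in range(height))
def pvIsBlank (grid : List (List String)) (height : Int) (col : Int) : Bool :=
  (PySem.List.pyRange 0 height 1).all (fun row => pvCell grid row col == some " ")

-- A's loop body: flush current_group on a blank column, else append col_idx to it
def pvStepA (blank : Int → Bool) (st : List (List Int) × List Int) (col : Int) :
    List (List Int) × List Int :=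
  if blank col then
    if st.2 ≠ [] then (st.1 ++ [st.2], ([] : List Int)) else st
  else (st.1, st.2 ++ [col])

-- A's trailing 'if current_group: problem_groups.append(current_group)'
def pvFinishA (st : List (List Int) × List Int) : List (List Int) :=
  if st.2 ≠ [] then st.1 ++ [st.2] else st.1

def find_problem_column_groups (grid : List (List String)) (width : Int) (height : Int) : List (List Int) :=
  if width = 0 then []
  else
    pvFinishA ((PySem.List.pyRange 0 width 1).foldl (pvStepA (pvIsBlank grid height)) ([], []))

-- ===== PORT B =====
-- B's start test: not blank(c) and (c == 0 or blank(c - 1))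
def pvStartP (blank : Int → Bool) (c : Int) : Bool :=
  !blank c && (c == 0 || blank (c - 1))

-- B's end test: not blank(c) and (c == width - 1 or blank(c + 1))
def pvEndP (blank : Int → Bool) (width c : Int) : Bool :=
  !blank c && (c == width - 1 || blank (c + 1))

def find_problem_column_groups_alt (grid : List (List String)) (width : Int) (height : Int) : List (List Int) :=
  let blank := pvIsBlank grid height
  let starts := (PySem.List.pyRange 0 width 1).filter (pvStartP blank)
  let ends := (PySem.List.pyRange 0 width 1).filter (pvEndP blank width)
  (starts.zip ends).map (fun p => PySem.List.pyRange p.1 (p.2 + 1) 1)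

-- ===== PRECONDITION & SPEC =====
-- Pre_ excludes exactly the inputs on which A's short-circuiting column scan performs
-- an out-of-range access, i.e. where Python raises IndexError; it admits every input
-- on which A returns. (A raising row index always has a witness ≤ grid.length, and
-- no-raise with positive width and height forces width ≤ len(grid[0]), so the
-- quantifiers are grid-bounded.)
def Pre_find_problem_column_groups (grid : List (List String)) (width : Int) (height : Int) : Prop :=
  width ≤ 0 ∨ height ≤ 0 ∨
  ((grid ≠ [] ∧ width ≤ (grid.headI.length : Int)) ∧
   ∀ c ∈ PySem.List.pyRange 0 width 1, ∀ r ∈ List.range (grid.length + 1),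
     (r : Int) < height →
     (∀ r' ∈ List.range r, pvCell grid (r' : Int) c = some " ") →
     (pvCell grid (r : Int) c).isSome)
instance (grid : List (List String)) (width : Int) (height : Int) : Decidable (Pre_find_problem_column_groups grid width height) := by unfold Pre_find_problem_column_groups; infer_instance

def pvWitness_find_problem_column_groups : List (List String) × Int × Int :=
  ([[" ", "1", " "], [" ", "2", "3"]], 3, 2)

def Spec_find_problem_column_groups (grid : List (List String)) (width : Int) (height : Int) (out : List (List Int)) : Prop := out = find_problem_column_groups_alt grid width height
instance (grid : List (List String)) (width : Int) (height : Int) (out : List (List Int)) : Decidable (Spec_find_problem_column_groups grid width height out) := by unfold Spec_find_problem_column_groups; infer_instance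

-- ===== CLAIM (what is proved, stated in full; the proofs are below) =====
def Claim_equal_find_problem_column_groups : Prop := ∀ (grid : List (List String)) (width : Int) (height : Int), Dom_find_problem_column_groups grid width height → Pre_find_problem_column_groups grid width height → Spec_find_problem_column_groups grid width height (find_problem_column_groups grid width height)

-- ===== LEMMAS AND PROOFS =====

-- proof-only abbreviations: B's two filters, and the 'interior ends' (right neighbour blank)
def pvStarts (blank : Int → Bool) (w : Int) : List Int :=
  (PySem.List.pyRange 0 w 1).filter (pvStartP blank)
def pvEndsI (blank : Int → Bool) (w : Int) : List Int :=
  (PySem.List.pyRange 0 (w - 1) 1).filter (fun c => !blank c && blank (c + 1))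
-- A's current_group is nonempty after scanning [0,w) iff the last column is non-blank
def pvOpen (blank : Int → Bool) (w : Int) : Bool := decide (0 < w) && !blank (w - 1)
def pvRng (p : Int × Int) : List Int := PySem.List.pyRange p.1 (p.2 + 1) 1

-- peeling the last column off B's start filter
theorem pvStarts_succ (blank : Int → Bool) (n : Nat) :
    pvStarts blank ((n : Int) + 1)
      = pvStarts blank n ++ (if pvStartP blank n then [(n : Int)] else []) := by
  unfold pvStarts
  rw [PySem.List.pyRange_one_succ_right (a := 0) (b := (n : Int)) (by omega),
    List.filter_append]
  cases h : pvStartP blank (n : Int) <;> simp [List.filter, h]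

-- peeling the last column off the interior-end filter
theorem pvEndsI_succ (blank : Int → Bool) (n : Nat) :
    pvEndsI blank ((n : Int) + 1)
      = pvEndsI blank n ++ (if pvOpen blank n && blank n then [(n : Int) - 1] else []) := by
  unfold pvEndsI
  rcases Nat.eq_zero_or_pos n with h0 | hpos
  · subst h0
    simp [pvOpen, PySem.List.pyRange_one_eq_nil]
  · have hsplit : PySem.List.pyRange 0 ((n : Int) + 1 - 1) 1
        = PySem.List.pyRange 0 ((n : Int) - 1) 1 ++ [(n : Int) - 1] := by
      have := PySem.List.pyRange_one_succ_right (a := 0) (b := (n : Int) - 1) (by omega)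
      have he : ((n : Int) - 1) + 1 = (n : Int) + 1 - 1 := by ring
      rw [he] at this
      exact this
    rw [hsplit, List.filter_append]
    have h1 : ((n : Int) - 1 + 1) = (n : Int) := by ring
    have hd : ((0 : Int) < (n : Int)) := by exact_mod_cast hpos
    have hpred : (!blank ((n : Int) - 1) && blank ((n : Int)))
        = (pvOpen blank n && blank n) := by
      simp [pvOpen, hpos]
    cases h : (pvOpen blank (n : Int) && blank (n : Int)) <;>
      simp [List.filter, h1, hpred, h]

-- the open/start flags, restated
theorem pvOpen_succ (blank : Int → Bool) (n : Nat) :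
    pvOpen blank ((n : Int) + 1) = !blank n := by
  have h1 : ((n : Int) + 1 - 1) = (n : Int) := by ring
  simp [pvOpen, h1]

theorem pvStartP_eq (blank : Int → Bool) (n : Nat) :
    pvStartP blank n = (!blank n && !pvOpen blank n) := by
  rcases Nat.eq_zero_or_pos n with h0 | hpos
  · subst h0; simp [pvStartP, pvOpen]
  · have h3 : ((n : Int) == 0) = false := by simp; omega
    simp [pvStartP, pvOpen, h3, hpos]

-- state of A's fold after the columns [0,n): either no open run (and the closed groups
-- are exactly zip(starts, interior ends)), or an open run starting at the last start s
theorem pvInv (blank : Int → Bool) (n : Nat) :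
    ( pvOpen blank n = false ∧
      (PySem.List.pyRange 0 (n : Int) 1).foldl (pvStepA blank) ([], [])
        = (((pvStarts blank n).zip (pvEndsI blank n)).map pvRng, [])
      ∧ (pvStarts blank n).length = (pvEndsI blank n).length )
    ∨ ( pvOpen blank n = true ∧ ∃ S s, pvStarts blank n = S ++ [s] ∧ 0 ≤ s ∧ s < (n : Int)
      ∧ (PySem.List.pyRange 0 (n : Int) 1).foldl (pvStepA blank) ([], [])
          = ((S.zip (pvEndsI blank n)).map pvRng, PySem.List.pyRange s (n : Int) 1)
      ∧ S.length = (pvEndsI blank n).length ) := by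
  induction n with
  | zero =>
    left
    refine ⟨by simp [pvOpen], ?_, ?_⟩ <;>
      simp [pvStarts, pvEndsI, PySem.List.pyRange_one_eq_nil]
  | succ n ih =>
    have hc : ((n + 1 : Nat) : Int) = (n : Int) + 1 := by push_cast; ring
    have hR : PySem.List.pyRange 0 ((n : Int) + 1) 1
        = PySem.List.pyRange 0 (n : Int) 1 ++ [(n : Int)] := by
      simpa using PySem.List.pyRange_one_succ_right (a := 0) (b := (n : Int)) (by omega)
    rw [hc, hR, List.foldl_append, pvStarts_succ, pvEndsI_succ, pvOpen_succ]
    cases hbn : blank (n : Int)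
    · -- column n is NOT blank: the run is (or stays) open
      right
      refine ⟨by simp, ?_⟩
      rcases ih with ⟨hop, hfold, hlen⟩ | ⟨hop, S, s, hS, hs0, hsn, hfold, hlen⟩
      · -- was closed: a new group starts at column n
        refine ⟨pvStarts blank n, (n : Int), ?_, by omega, by omega, ?_, ?_⟩
        · rw [pvStartP_eq, hbn, hop]
          simp
        · rw [hfold]
          simp only [List.foldl_cons, List.foldl_nil, pvStepA, hbn]
          rw [hop]
          have : PySem.List.pyRange (n : Int) ((n : Int) + 1) 1 = [(n : Int)] :=
            PySem.List.pyRange_one_singleton (n : Int)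
          simp [this]
        · rw [hop]
          simpa using hlen
      · -- was open: column n extends the current run
        refine ⟨S, s, ?_, hs0, by omega, ?_, ?_⟩
        · rw [pvStartP_eq, hbn, hop]
          simpa using hS
        · rw [hfold]
          simp only [List.foldl_cons, List.foldl_nil, pvStepA, hbn]
          rw [hop]
          have : PySem.List.pyRange s (n : Int) 1 ++ [(n : Int)]
              = PySem.List.pyRange s ((n : Int) + 1) 1 :=
            (PySem.List.pyRange_one_succ_right (a := s) (b := (n : Int)) (by omega)).symm
          simp [this]
        · rw [hop]
          simpa using hlen
    · -- column n IS blank: any open run is flushed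
      left
      refine ⟨by simp, ?_⟩
      rcases ih with ⟨hop, hfold, hlen⟩ | ⟨hop, S, s, hS, hs0, hsn, hfold, hlen⟩
      · -- was closed: nothing changes
        rw [pvStartP_eq, hbn, hop, hfold]
        simp [pvStepA, hbn, hlen]
      · -- was open: the run [s, n) is appended as a finished group
        have hcur : PySem.List.pyRange s (n : Int) 1 ≠ [] := by
          intro h
          have := PySem.List.length_pyRange_one (a := s) (b := (n : Int))
          rw [h] at this
          simp at this
          omega
        have hzip : ((S ++ [s]).zip (pvEndsI blank n ++ [(n : Int) - 1]))
            = S.zip (pvEndsI blank n) ++ [(s, (n : Int) - 1)] := by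
          rw [List.zip_append hlen]
          rfl
        have hrng : pvRng (s, (n : Int) - 1) = PySem.List.pyRange s (n : Int) 1 := by
          unfold pvRng
          norm_num
        rw [pvStartP_eq, hbn, hop, hfold, hS]
        constructor
        · simp only [List.foldl_cons, List.foldl_nil, pvStepA, hbn]
          simp [hcur, hzip, hrng]
        · simp [hlen]

-- full end list = interior ends, plus the last column when the final run is open
theorem pvEnds_split (blank : Int → Bool) (n : Nat) (hn : 0 < n) :
    (PySem.List.pyRange 0 (n : Int) 1).filter (pvEndP blank n)
      = pvEndsI blank n ++ (if pvOpen blank n then [(n : Int) - 1] else []) := by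
  have h1 : (0 : Int) ≤ (n : Int) - 1 := by omega
  have hsplit : PySem.List.pyRange 0 (n : Int) 1
      = PySem.List.pyRange 0 ((n : Int) - 1) 1 ++ [(n : Int) - 1] := by
    have := PySem.List.pyRange_one_succ_right (a := 0) (b := (n : Int) - 1) h1
    simpa using this
  rw [hsplit, List.filter_append]
  have hfirst : (PySem.List.pyRange 0 ((n : Int) - 1) 1).filter (pvEndP blank n)
      = pvEndsI blank n := by
    unfold pvEndsI
    apply List.filter_congr
    intro c hc
    have hc' := (PySem.List.mem_pyRange_one).1 hc
    have : (c == (n : Int) - 1) = false := by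
      simp only [beq_eq_false_iff_ne]; omega
    simp [pvEndP, this]
  have hlast : List.filter (pvEndP blank n) [(n : Int) - 1]
      = (if pvOpen blank n then [(n : Int) - 1] else []) := by
    have : pvEndP blank n ((n : Int) - 1) = pvOpen blank n := by
      simp [pvEndP, pvOpen, hn]
    cases h : pvOpen blank n <;> simp [List.filter, this, h]
  rw [hfirst, hlast]

-- ===== VERDICT (by name: the statement is the Claim_ definition above) =====
theorem find_problem_column_groups_spec : Claim_equal_find_problem_column_groups := by
  intro grid width height _hdom _hpre
  unfold Spec_find_problem_column_groups find_problem_column_groups find_problem_column_groups_alt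
  by_cases hw : width ≤ 0
  · have hnil : PySem.List.pyRange 0 width 1 = [] := PySem.List.pyRange_one_eq_nil hw
    by_cases h0 : width = 0 <;> simp [h0, hnil, pvFinishA]
  · push Not at hw
    have hw0 : width ≠ 0 := by omega
    rw [if_neg hw0]
    set blank := pvIsBlank grid height with hb
    obtain ⟨n, hn⟩ : ∃ n : Nat, (n : Int) = width := ⟨width.toNat, by omega⟩
    have hnpos : 0 < n := by omega
    rw [← hn]
    dsimp only
    rw [pvEnds_split blank n hnpos]
    rcases pvInv blank n with ⟨hop, hfold, _⟩ | ⟨hop, S, s, hS, _hs0, hsn, hfold, hlen⟩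
    · rw [hfold, hop]
      simp [pvFinishA, pvStarts, pvRng]
    · rw [hfold, hop]
      have hcur : PySem.List.pyRange s (n : Int) 1 ≠ [] := by
        intro h
        have := PySem.List.length_pyRange_one (a := s) (b := (n : Int))
        rw [h] at this
        simp at this
        omega
      have hzip : ((S ++ [s]).zip (pvEndsI blank n ++ [(n : Int) - 1]))
          = S.zip (pvEndsI blank n) ++ [(s, (n : Int) - 1)] := by
        rw [List.zip_append hlen]
        rfl
      have hrng : pvRng (s, (n : Int) - 1) = PySem.List.pyRange s (n : Int) 1 := by
        unfold pvRng
        norm_num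
      simp only [pvFinishA, if_pos hcur, pvStarts] at *
      rw [hS] at *
      simp only [if_true, hzip, List.map_append, List.map_cons, List.map_nil]
      unfold pvRng
      norm_num
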